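-- pv_equiv track=rewrite | github.com/sistemasbuho/Sistema-Alertas | apps/base/serializers/serializer_redes.py | obtener_contenido_twitter
-- ===== SOURCE A (Python) =====
-- def obtener_contenido_twitter(texto):
--     """
--     Devuelve el texto hasta QT/Repost (incluyendo la palabra).
--     """
--     qt_index = texto.find("QT")
--     repost_index = texto.find("Repost")
--     indices = [i for i in [qt_index, repost_index] if i != -1]
--     if indices:
--         corte = min(indices)
--         # Agregamos la longitud de la palabra encontrada
--         if corte == qt_index:
--             corte += len("QT")
--         elif corte == repost_index:
--             corte += len("Repost")
--         return texto[:corte].strip()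
--     return texto.strip()
-- ===== SOURCE B (Python) =====
-- def obtener_contenido_twitter(texto):
--     """
--     Devuelve el texto hasta QT/Repost (incluyendo la palabra).
--     """
--     for i in range(len(texto)):
--         for marker in ("QT", "Repost"):
--             if texto.startswith(marker, i):
--                 return texto[:i + len(marker)].strip()
--     return texto.strip()
-- ===== Notes on version B (the rewrite author's own statement) =====
-- stated objective: alternative
-- what changed: Replaces the two full find() scans plus min/length fixup with a single left-to-right scan that stops at the first position where either marker starts and cuts there.
import Mathlib
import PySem

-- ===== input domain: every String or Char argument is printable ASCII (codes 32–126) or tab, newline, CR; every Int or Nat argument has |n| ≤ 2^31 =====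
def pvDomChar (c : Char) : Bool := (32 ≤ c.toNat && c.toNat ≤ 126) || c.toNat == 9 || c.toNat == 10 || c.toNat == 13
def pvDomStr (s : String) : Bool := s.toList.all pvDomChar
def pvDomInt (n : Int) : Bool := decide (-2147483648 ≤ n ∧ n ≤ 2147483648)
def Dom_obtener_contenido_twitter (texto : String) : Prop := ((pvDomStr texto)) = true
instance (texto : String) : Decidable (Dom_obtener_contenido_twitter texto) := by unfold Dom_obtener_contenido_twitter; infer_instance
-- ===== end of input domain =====

-- B replaces A's two separate find() scans + min + per-marker length fixup by one
-- left-to-right scan that cuts at the first position where either marker starts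
-- (objective: alternative; same asymptotic cost).

-- ===== PORT A =====
def obtener_contenido_twitter (texto : String) : String :=
  let qt_index : Int := PySem.Str.find texto "QT"
  let repost_index : Int := PySem.Str.find texto "Repost"
  let indices : List Int := [qt_index, repost_index].filter (fun i => i != -1)
  if indices ≠ [] then
    -- Python's min(indices): indices is nonempty here, so min? is some
    match PySem.List.min? indices (fun x => x) with
    | some corte₀ =>
        let corte : Int :=
          if corte₀ = qt_index then corte₀ + PySem.Str.len "QT"
          else if corte₀ = repost_index then corte₀ + PySem.Str.len "Repost"
          else corte₀
        PySem.Str.strip (PySem.Str.slice texto none (some corte))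
    | none => PySem.Str.strip texto  -- unreachable (indices ≠ [])
  else PySem.Str.strip texto

-- ===== PORT B =====
-- the 'for i in range(len(texto))' loop; texto.startswith(marker, i) with 0 ≤ i ≤ len
-- is exactly 'startswith' of the list dropped at i
def pvScan (texto : String) (i : Nat) : List Char → String
  | [] => PySem.Str.strip texto
  | _ :: rest =>
    if PySem.Chars.startswith (texto.toList.drop i) "QT".toList then
      PySem.Str.strip (PySem.Str.slice texto none (some ((i : Int) + PySem.Str.len "QT")))
    else if PySem.Chars.startswith (texto.toList.drop i) "Repost".toList then
      PySem.Str.strip (PySem.Str.slice texto none (some ((i : Int) + PySem.Str.len "Repost")))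
    else pvScan texto (i + 1) rest

def obtener_contenido_twitter_alt (texto : String) : String :=
  pvScan texto 0 texto.toList

-- ===== PRECONDITION & SPEC =====
def Spec_obtener_contenido_twitter (texto : String) (out : String) : Prop := out = obtener_contenido_twitter_alt texto
instance (texto : String) (out : String) : Decidable (Spec_obtener_contenido_twitter texto out) := by unfold Spec_obtener_contenido_twitter; infer_instance

-- ===== CLAIM (what is proved, stated in full; the proofs are below) =====
def Claim_equal_obtener_contenido_twitter : Prop := ∀ (texto : String), Dom_obtener_contenido_twitter texto → Spec_obtener_contenido_twitter texto (obtener_contenido_twitter texto)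

-- ===== LEMMAS AND PROOFS =====

-- find points at k when sub starts at k and at no earlier position
lemma pv_find_eq_of_first (s sub : List Char) (k : Nat)
    (h : sub <+: s.drop k) (hprev : ∀ j < k, ¬ sub <+: s.drop j) :
    PySem.Chars.find s sub = (k : Int) := by
  have hnn : 0 ≤ PySem.Chars.find s sub := by
    rw [PySem.Chars.find_nonneg_iff, ← PySem.Chars.isIn_iff_infix,
      ← PySem.Chars.exists_prefix_drop_iff_isIn]
    exact ⟨k, h⟩
  obtain ⟨hpre, hmin⟩ := PySem.Chars.find_spec hnn
  have h1 : ¬ (PySem.Chars.find s sub).toNat < k := fun hlt => hprev _ hlt hpre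
  have h2 : ¬ k < (PySem.Chars.find s sub).toNat := fun hlt => hmin _ hlt h
  omega

-- if sub occurs at all but at no position < k, then k ≤ find
lemma pv_le_find (s sub : List Char) (k : Nat)
    (hprev : ∀ j < k, ¬ sub <+: s.drop j)
    (hne : PySem.Chars.find s sub ≠ -1) :
    (k : Int) ≤ PySem.Chars.find s sub := by
  have hnn : 0 ≤ PySem.Chars.find s sub := by
    rw [PySem.Chars.find_nonneg_iff, ← PySem.Chars.find_ne_neg_one_iff]; exact hne
  obtain ⟨hpre, _⟩ := PySem.Chars.find_spec hnn
  have : ¬ (PySem.Chars.find s sub).toNat < k := fun hlt => hprev _ hlt hpre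
  omega

-- B's scan from position k equals A's result, given that no marker starts before k
lemma pvScan_eq (texto : String) (rest : List Char) :
    ∀ k, texto.toList.drop k = rest →
    (∀ j < k, ¬ ((['Q','T'] : List Char) <+: texto.toList.drop j) ∧
              ¬ ((['R','e','p','o','s','t'] : List Char) <+: texto.toList.drop j)) →
    pvScan texto k rest = obtener_contenido_twitter texto := by
  induction rest with
  | nil =>
    intro k hdrop hprev
    have hall : ∀ j, ¬ ((['Q','T'] : List Char) <+: texto.toList.drop j) ∧
        ¬ ((['R','e','p','o','s','t'] : List Char) <+: texto.toList.drop j) := by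
      intro j
      by_cases hj : j < k
      · exact hprev j hj
      · have hlen : texto.toList.length ≤ k := List.drop_eq_nil_iff.mp hdrop
        have : texto.toList.drop j = [] := List.drop_eq_nil_of_le (by omega)
        rw [this]
        constructor <;> simp [List.prefix_nil]
    have hqt : PySem.Chars.find texto.toList ['Q','T'] = -1 := by
      rw [PySem.Chars.find_eq_neg_one_iff, ← PySem.Chars.isIn_iff_infix,
        ← PySem.Chars.exists_prefix_drop_iff_isIn]
      rintro ⟨j, hj⟩; exact (hall j).1 hj
    have hrp : PySem.Chars.find texto.toList ['R','e','p','o','s','t'] = -1 := by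
      rw [PySem.Chars.find_eq_neg_one_iff, ← PySem.Chars.isIn_iff_infix,
        ← PySem.Chars.exists_prefix_drop_iff_isIn]
      rintro ⟨j, hj⟩; exact (hall j).2 hj
    simp [pvScan, obtener_contenido_twitter, PySem.Str.find_eq, hqt, hrp]
  | cons c rest ih =>
    intro k hdrop hprev
    have hdrop' : texto.toList.drop (k + 1) = rest := by
      rw [← List.tail_drop, hdrop]; rfl
    by_cases hQT : PySem.Chars.startswith (texto.toList.drop k) ['Q','T'] = true
    · -- QT starts at k: find QT = k, Repost is -1 or ≥ k; A cuts at k + 2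
      have hqt : PySem.Chars.find texto.toList ['Q','T'] = (k : Int) :=
        pv_find_eq_of_first _ _ _ ((PySem.Chars.startswith_iff _ _).mp hQT)
          (fun j hj => (hprev j hj).1)
      have hkne : ((k : Int) != -1) = true := by simp
      by_cases hrp : PySem.Chars.find texto.toList ['R','e','p','o','s','t'] = -1
      · simp [pvScan, hQT, obtener_contenido_twitter, PySem.Str.find_eq, hqt, hrp, hkne,
          List.filter, PySem.List.min?_id_cons]
      · have hle : (k : Int) ≤ PySem.Chars.find texto.toList ['R','e','p','o','s','t'] :=
          pv_le_find _ _ _ (fun j hj => (hprev j hj).2) hrp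
        have hb : (PySem.Chars.find texto.toList ['R','e','p','o','s','t'] != -1) = true := by
          simpa using hrp
        simp [pvScan, hQT, obtener_contenido_twitter, PySem.Str.find_eq, hqt, hb, hkne,
          List.filter, PySem.List.min?_id_cons, min_eq_left hle]
    · by_cases hRP : PySem.Chars.startswith (texto.toList.drop k) ['R','e','p','o','s','t'] = true
      · -- Repost starts at k (QT does not): find Repost = k, find QT is -1 or > k
        have hrp : PySem.Chars.find texto.toList ['R','e','p','o','s','t'] = (k : Int) :=
          pv_find_eq_of_first _ _ _ ((PySem.Chars.startswith_iff _ _).mp hRP)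
            (fun j hj => (hprev j hj).2)
        have hkne : ((k : Int) != -1) = true := by simp
        have hkne' : ¬ ((k : Int) = -1) := by omega
        by_cases hqt : PySem.Chars.find texto.toList ['Q','T'] = -1
        · simp [pvScan, hQT, hRP, obtener_contenido_twitter, PySem.Str.find_eq, hqt, hrp,
            hkne, hkne', List.filter, PySem.List.min?_id_cons]
        · have hle : (k : Int) ≤ PySem.Chars.find texto.toList ['Q','T'] :=
            pv_le_find _ _ _ (fun j hj => (hprev j hj).1) hqt
          have hne : PySem.Chars.find texto.toList ['Q','T'] ≠ (k : Int) := by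
            intro he
            have h0 : 0 ≤ PySem.Chars.find texto.toList ['Q','T'] := by omega
            obtain ⟨hpre, _⟩ := PySem.Chars.find_spec h0
            rw [he] at hpre
            simp only [Int.toNat_natCast] at hpre
            exact hQT ((PySem.Chars.startswith_iff _ _).mpr hpre)
          have hb : (PySem.Chars.find texto.toList ['Q','T'] != -1) = true := by
            simpa using hqt
          simp [pvScan, hQT, hRP, obtener_contenido_twitter, PySem.Str.find_eq, hrp, hb,
            hkne, List.filter, PySem.List.min?_id_cons,
            min_eq_right (le_of_lt (lt_of_le_of_ne hle (Ne.symm hne))), Ne.symm hne]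
      · -- no marker at k: step
        rw [show pvScan texto k (c :: rest) = pvScan texto (k + 1) rest by
          simp [pvScan, hQT, hRP]]
        refine ih (k + 1) hdrop' ?_
        intro j hj
        by_cases hjk : j < k
        · exact hprev j hjk
        · have : j = k := by omega
          subst this
          exact ⟨fun h => hQT ((PySem.Chars.startswith_iff _ _).mpr h),
                 fun h => hRP ((PySem.Chars.startswith_iff _ _).mpr h)⟩

-- ===== VERDICT (by name: the statement is the Claim_ definition above) =====
theorem obtener_contenido_twitter_spec : Claim_equal_obtener_contenido_twitter := by
  intro texto _
  unfold Spec_obtener_contenido_twitter obtener_contenido_twitter_alt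
  exact (pvScan_eq texto texto.toList 0 (by simp) (by intro j hj; omega)).symm
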